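-- pv_equiv track=rewrite | github.com/Zac-Chen-2024/PetitonLetterUserstudyFrontend | backend/app/services/entity_analyzer.py | _format_snippets_by_exhibit
-- ===== SOURCE A (Python) =====
-- from typing import Dict, List, Any, Optional
--
-- def _format_snippets_by_exhibit(snippets: List[Dict]) -> str:
--     """按 Exhibit 分组格式化 snippets"""
--     by_exhibit = {}
--     for s in snippets:
--         exhibit_id = s.get("exhibit_id", "unknown")
--         if exhibit_id not in by_exhibit:
--             by_exhibit[exhibit_id] = []
--         by_exhibit[exhibit_id].append(s)
--
--     lines = []
--     for exhibit_id in sorted(by_exhibit.keys()):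
--         exhibit_snippets = by_exhibit[exhibit_id]
--         lines.append(f"\n### Exhibit {exhibit_id} ({len(exhibit_snippets)} snippets)")
--
--         # 取前 3 个 snippet 的摘要
--         for s in exhibit_snippets[:3]:
--             text = s.get("text", "")[:150]
--             subject = s.get("subject", "")
--             etype = s.get("evidence_type", "")
--             lines.append(f"  - [{etype}] {subject}: {text}...")
--
--         if len(exhibit_snippets) > 3:
--             lines.append(f"  ... and {len(exhibit_snippets) - 3} more")
--
--     return "\n".join(lines)
-- ===== SOURCE B (Python) =====
-- def _format_snippets_by_exhibit(snippets):
--     def key(s):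
--         return s.get("exhibit_id", "unknown")
--
--     def section(eid):
--         grp = [s for s in snippets if key(s) == eid]
--         head = f"\n### Exhibit {eid} ({len(grp)} snippets)"
--         body = [f"  - [{s.get('evidence_type', '')}] {s.get('subject', '')}: {s.get('text', '')[:150]}..."
--                 for s in grp[:3]]
--         tail = [f"  ... and {len(grp) - 3} more"] if len(grp) > 3 else []
--         return [head] + body + tail
--
--     return "\n".join(line
--                      for eid in sorted({key(s) for s in snippets})
--                      for line in section(eid))
-- ===== Notes on version B (the rewrite author's own statement) =====
-- stated objective: idiomatic
-- what changed: Replaces the dict-accumulate-then-sorted-keys structure with sorting the deduplicated key set and selecting each group by a per-key filter pass, emitting each section as a list comprehension joined at the end.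
import Mathlib
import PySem

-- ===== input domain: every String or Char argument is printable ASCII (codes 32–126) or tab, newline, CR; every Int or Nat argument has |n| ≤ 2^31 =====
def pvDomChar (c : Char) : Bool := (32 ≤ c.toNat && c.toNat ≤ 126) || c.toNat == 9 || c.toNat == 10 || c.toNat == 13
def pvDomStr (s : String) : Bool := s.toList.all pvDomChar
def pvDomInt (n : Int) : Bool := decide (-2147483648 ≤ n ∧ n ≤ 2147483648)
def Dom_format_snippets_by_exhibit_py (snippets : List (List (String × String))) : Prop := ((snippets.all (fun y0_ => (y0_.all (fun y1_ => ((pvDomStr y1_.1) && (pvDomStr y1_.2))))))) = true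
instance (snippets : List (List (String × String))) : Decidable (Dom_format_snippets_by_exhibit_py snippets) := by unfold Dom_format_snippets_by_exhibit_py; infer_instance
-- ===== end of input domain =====

-- B replaces A's dict-accumulate-then-sorted-keys structure by sorting the deduplicated
-- key set and selecting each exhibit's group with a per-key filter pass (objective: a
-- more idiomatic decomposition; same return value).

-- ===== PORT A =====
def format_snippets_by_exhibit_py (snippets : List (List (String × String))) : String :=
  let by_exhibit : PySem.Dict String (List (List (String × String))) :=
    snippets.foldl (fun d s =>
      let exhibit_id := (PySem.Dict.mk s).getD "exhibit_id" "unknown"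
      let d' := if d.contains exhibit_id then d else d.insert exhibit_id []
      d'.modify exhibit_id [] (fun l => l ++ [s])) PySem.Dict.empty
  let lines : List String :=
    (PySem.List.sorted by_exhibit.keys (fun k => k) false).foldl (fun lines exhibit_id =>
      let exhibit_snippets := by_exhibit.getD exhibit_id []
      let lines := lines ++ ["\n### Exhibit " ++ exhibit_id ++ " (" ++
        PySem.Int.toStr (exhibit_snippets.length : Int) ++ " snippets)"]
      let lines := (PySem.List.slice exhibit_snippets none (some 3)).foldl (fun lines s =>
        let text := PySem.Str.slice ((PySem.Dict.mk s).getD "text" "") none (some 150)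
        let subject := (PySem.Dict.mk s).getD "subject" ""
        let etype := (PySem.Dict.mk s).getD "evidence_type" ""
        lines ++ ["  - [" ++ etype ++ "] " ++ subject ++ ": " ++ text ++ "..."]) lines
      if 3 < exhibit_snippets.length then
        lines ++ ["  ... and " ++ PySem.Int.toStr ((exhibit_snippets.length : Int) - 3) ++ " more"]
      else lines) []
  PySem.Str.join "\n" lines

-- ===== PORT B =====
def pvKey (s : List (String × String)) : String :=
  (PySem.Dict.mk s).getD "exhibit_id" "unknown"

def pvSection (snippets : List (List (String × String))) (eid : String) : List String :=
  let grp := snippets.filter (fun s => pvKey s == eid)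
  let head := "\n### Exhibit " ++ eid ++ " (" ++ PySem.Int.toStr (grp.length : Int) ++ " snippets)"
  let body := (grp.take 3).map (fun s =>
    "  - [" ++ (PySem.Dict.mk s).getD "evidence_type" "" ++ "] " ++
    (PySem.Dict.mk s).getD "subject" "" ++ ": " ++
    PySem.Str.slice ((PySem.Dict.mk s).getD "text" "") none (some 150) ++ "...")
  let tail := if 3 < grp.length then
    ["  ... and " ++ PySem.Int.toStr ((grp.length : Int) - 3) ++ " more"] else []
  [head] ++ body ++ tail

def format_snippets_by_exhibit_py_alt (snippets : List (List (String × String))) : String :=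
  PySem.Str.join "\n"
    ((PySem.List.sorted (PySem.Set.ofList (snippets.map pvKey)) (fun k => k) false).flatMap
      (pvSection snippets))

-- ===== PRECONDITION & SPEC =====
def Spec_format_snippets_by_exhibit_py (snippets : List (List (String × String))) (out : String) : Prop := out = format_snippets_by_exhibit_py_alt snippets
instance (snippets : List (List (String × String))) (out : String) : Decidable (Spec_format_snippets_by_exhibit_py snippets out) := by unfold Spec_format_snippets_by_exhibit_py; infer_instance

-- ===== CLAIM (what is proved, stated in full; the proofs are below) =====
def Claim_equal_format_snippets_by_exhibit_py : Prop := ∀ (snippets : List (List (String × String))), Dom_format_snippets_by_exhibit_py snippets → Spec_format_snippets_by_exhibit_py snippets (format_snippets_by_exhibit_py snippets)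

-- ===== LEMMAS AND PROOFS =====

theorem pvKey_def (s : List (String × String)) :
    (PySem.Dict.mk s).getD "exhibit_id" "unknown" = pvKey s := rfl

-- A's conditional "insert [] if missing, then append" step is exactly a modify step.
theorem pv_step_eq (d : PySem.Dict String (List (List (String × String))))
    (s : List (String × String)) :
    (if d.contains (pvKey s) then d else d.insert (pvKey s) []).modify (pvKey s) []
        (fun l => l ++ [s]) =
      d.modify (pvKey s) [] (fun l => l ++ [s]) := by
  by_cases h : d.contains (pvKey s) = true
  · rw [if_pos h]
  · rw [if_neg h]
    simp only [Bool.not_eq_true] at h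
    simp only [PySem.Dict.modify, PySem.Dict.getD_insert_self,
      PySem.Dict.insert_insert_self, PySem.Dict.getD_of_not_contains d _ h]

-- A's accumulated dict, characterised: lookup is a filter, keys are the dedup of the keys.
theorem pv_dict_getD (snippets : List (List (String × String))) (c : String) :
    (snippets.foldl (fun d s => d.modify (pvKey s) [] (fun l => l ++ [s]))
        PySem.Dict.empty).getD c [] =
      snippets.filter (fun s => pvKey s == c) := by
  have h := PySem.Dict.getD_foldl_modify_append
    (snippets.map (fun s => (pvKey s, s))) (PySem.Dict.empty (κ := String)) c
  rw [List.foldl_map] at h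
  simpa [List.filter_map, Function.comp_def, List.map_map] using h

theorem pv_dict_keys (snippets : List (List (String × String))) :
    (snippets.foldl (fun d s => d.modify (pvKey s) [] (fun l => l ++ [s]))
        PySem.Dict.empty).keys = PySem.Set.ofList (snippets.map pvKey) := by
  rw [PySem.Dict.keys_foldl_modify_key snippets pvKey [] (fun _ s l => l ++ [s])]
  simp [PySem.Set.ofList_eq_foldl, PySem.Set.update]

-- ===== VERDICT (by name: the statement is the Claim_ definition above) =====
theorem format_snippets_by_exhibit_py_spec : Claim_equal_format_snippets_by_exhibit_py := by
  intro snippets _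
  unfold Spec_format_snippets_by_exhibit_py
  simp only [format_snippets_by_exhibit_py, format_snippets_by_exhibit_py_alt]
  simp only [pvKey_def]
  rw [PySem.List.foldl_congr_mem _ _ _ _ (fun d s _ => pv_step_eq d s)]
  rw [pv_dict_keys]
  congr 1
  rw [PySem.List.foldl_congr_mem
      (g := fun acc eid => acc ++ pvSection snippets eid)
      _ _ _ (fun acc eid _ => by
        rw [pv_dict_getD]
        simp only [pvSection]
        rw [PySem.List.slice_to (hb := by norm_num)]
        rw [PySem.List.foldl_append_singleton_eq_map]
        split_ifs with h <;> simp)]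
  rw [PySem.List.foldl_append_eq_flatMap]
  simp
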